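-- pv_equiv track=rewrite | github.com/antonegas/kattis | session2/watershed.py | watershed
-- ===== SOURCE A (Python) =====
-- def get_neighbors(graph: list[list[int]], x: int, y: int) -> list[tuple[int, int]]:
--     neighbors = list()
--
--     for dx, dy in [(-1, 0), (0, -1), (0, 1), (1, 0)]:
--         u = x + dx
--         v = y + dy
--
--         if u < 0 or u >= len(graph[0]):
--             continue
--         if v < 0 or v >= len(graph):
--             continue
--
--         neighbors.append((u, v))
--
--     return neighbors
--
-- def watershed(land: list[list[int]]) -> list[list[str]]:
--     ALPHABET = "abcdefghijklmnopqrstuvwxyz"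
--     queue = list()
--
--     for y in range(len(land)):
--         for x in range(len(land[y])):
--             queue.append((land[y][x], y, x))
--
--     intermediate = [[-1] * len(land[0]) for _ in range(len(land))]
--
--     current = 0
--
--     for level, y, x in sorted(queue):
--         if intermediate[y][x] == -1:
--             intermediate[y][x] = current
--             current += 1
--
--         for u, v in get_neighbors(intermediate, x, y):
--             if intermediate[v][u] == -1 and level < land[v][u]:
--                 intermediate[v][u] = intermediate[y][x]
--
--     regions = [["#"] * len(land[0]) for _ in range(len(land))]
--     alphabet_map = [-1] * current
--
--     letter = 0
--
--     for y in range(len(land)):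
--         for x in range(len(land[0])):
--             key = intermediate[y][x]
--
--             if alphabet_map[key] == -1:
--                 alphabet_map[key] = letter
--                 letter += 1
--
--             regions[y][x] = ALPHABET[alphabet_map[key]]
--
--     return regions
-- ===== SOURCE B (Python) =====
-- def watershed(land: list[list[int]]) -> list[list[str]]:
--     ALPHABET = "abcdefghijklmnopqrstuvwxyz"
--     H, W = len(land), len(land[0])
--
--     def parent(y, x):
--         best = None
--         for v, u in ((y, x - 1), (y - 1, x), (y + 1, x), (y, x + 1)):
--             if 0 <= v < H and 0 <= u < W and land[v][u] < land[y][x]: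
--                 if best is None or (land[v][u], v, u) < (land[best[0]][best[1]], best[0], best[1]):
--                     best = (v, u)
--         return best
--
--     def find(y, x):
--         p = parent(y, x)
--         while p is not None:
--             y, x = p
--             p = parent(y, x)
--         return (y, x)
--
--     letters = {}
--     regions = []
--     for y in range(H):
--         row = []
--         for x in range(W):
--             r = find(y, x)
--             if r not in letters:
--                 letters[r] = ALPHABET[len(letters)]
--             row.append(letters[r])
--         regions.append(row)
--     return regions
-- ===== Notes on version B (the rewrite author's own statement) =====
-- stated objective: alternative
-- what changed: A floods the grid by iterating over all cells sorted by (height, y, x), assigning labels and spreading them to higher neighbours, then relabels row-major; B instead computes, per cell, a steepest-descent parent pointer (the strictly-lower neighbour minimal in (height, y, x)) and chases it to the region's root, assigning letters at the first row-major occurrence of each root.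
-- outside the precondition, e.g. on watershed([]): A returns [], B raises IndexError
import Mathlib
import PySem

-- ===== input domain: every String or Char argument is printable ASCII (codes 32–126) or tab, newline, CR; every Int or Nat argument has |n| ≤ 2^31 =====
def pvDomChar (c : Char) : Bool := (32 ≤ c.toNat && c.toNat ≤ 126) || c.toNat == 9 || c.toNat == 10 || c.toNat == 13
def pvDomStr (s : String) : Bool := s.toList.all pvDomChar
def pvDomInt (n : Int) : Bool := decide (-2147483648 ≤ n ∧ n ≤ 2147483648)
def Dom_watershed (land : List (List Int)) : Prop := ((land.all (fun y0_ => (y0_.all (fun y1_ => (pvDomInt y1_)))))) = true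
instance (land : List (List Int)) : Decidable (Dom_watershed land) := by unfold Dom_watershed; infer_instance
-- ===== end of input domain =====

-- B replaces A's global sorted flood (sort all cells, label in order, spread to higher
-- neighbours) by a per-cell steepest-descent pointer chase to the region's root plus a
-- row-major first-occurrence lettering — an alternative algorithm of similar cost.

-- Python tuple comparison on int triples (lexicographic), used by both ports
def pyLex3 (t : Int × Int × Int) : Int ×ₗ (Int ×ₗ Int) := toLex (t.1, toLex (t.2.1, t.2.2))

-- m[y][x] = v  (exact for the non-negative in-range indices both programs use)
def setCell {α : Type} (m : List (List α)) (y x : Int) (v : α) : List (List α) :=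
  m.set y.toNat ((m.getD y.toNat []).set x.toNat v)

-- m[y][x]
def readCell {α : Type} [Inhabited α] (m : List (List α)) (y x : Int) : α :=
  PySem.List.pyGetD (PySem.List.pyGetD m y []) x default

-- ===== PORT A =====
def get_neighbors (graph : List (List Int)) (x y : Int) : List (Int × Int) :=
  [((-1 : Int), (0 : Int)), (0, -1), (0, 1), (1, 0)].foldl
    (fun acc d =>
      let u := x + d.1
      let v := y + d.2
      if u < 0 ∨ u ≥ ((PySem.List.pyGetD graph 0 []).length : Int) then acc
      else if v < 0 ∨ v ≥ (graph.length : Int) then acc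
      else acc ++ [(u, v)]) []

def watershed (land : List (List Int)) : List (List String) :=
  let ALPHABET := "abcdefghijklmnopqrstuvwxyz"
  let queue : List (Int × Int × Int) :=
    (PySem.List.pyRange 0 land.length 1).foldl (fun q y =>
      (PySem.List.pyRange 0 (PySem.List.pyGetD land y []).length 1).foldl (fun q x =>
        q ++ [(PySem.List.pyGetD (PySem.List.pyGetD land y []) x 0, y, x)]) q) []
  let intermediate : List (List Int) :=
    List.replicate land.length (List.replicate (PySem.List.pyGetD land 0 []).length (-1))
  let fin := (PySem.List.sorted queue pyLex3 false).foldl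
    (fun (st : List (List Int) × Int) t =>
      let level := t.1; let y := t.2.1; let x := t.2.2
      let st1 : List (List Int) × Int :=
        if readCell st.1 y x = -1 then (setCell st.1 y x st.2, st.2 + 1) else st
      (get_neighbors st1.1 x y).foldl
        (fun (st2 : List (List Int) × Int) uv =>
          let u := uv.1; let v := uv.2
          if readCell st2.1 v u = -1 ∧ level < readCell land v u then
            (setCell st2.1 v u (readCell st2.1 y x), st2.2)
          else st2) st1)
    (intermediate, 0)
  let inter := fin.1
  let current := fin.2
  let regions0 : List (List String) :=
    List.replicate land.length (List.replicate (PySem.List.pyGetD land 0 []).length "#")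
  let fin2 := (PySem.List.pyRange 0 land.length 1).foldl
    (fun (st : List (List String) × List Int × Int) y =>
      (PySem.List.pyRange 0 ((PySem.List.pyGetD land 0 []).length : Int) 1).foldl
        (fun (st : List (List String) × List Int × Int) x =>
          let key := readCell inter y x
          let st' : List (List String) × List Int × Int :=
            if PySem.List.pyGetD st.2.1 key 0 = -1 then
              (st.1, st.2.1.set key.toNat st.2.2, st.2.2 + 1)
            else st
          (setCell st'.1 y x
             (((PySem.Str.pyGet? ALPHABET (PySem.List.pyGetD st'.2.1 key 0)).map Char.toString).getD "#"),
           st'.2.1, st'.2.2))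
        st)
    (regions0, List.replicate current.toNat (-1), 0)
  fin2.1

-- ===== PORT B =====
def pvParent (land : List (List Int)) (H W : Nat) (y x : Int) : Option (Int × Int) :=
  [(y, x - 1), (y - 1, x), (y + 1, x), (y, x + 1)].foldl
    (fun best vu =>
      let v := vu.1; let u := vu.2
      if 0 ≤ v ∧ v < (H : Int) ∧ 0 ≤ u ∧ u < (W : Int) ∧ readCell land v u < readCell land y x then
        match best with
        | none => some (v, u)
        | some b =>
          if pyLex3 (readCell land v u, v, u) < pyLex3 (readCell land b.1 b.2, b.1, b.2) then
            some (v, u)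
          else best
      else best) none

-- the while loop of B's `find`, with fuel H*W (enough: the chase strictly descends)
def pvFind (land : List (List Int)) (H W : Nat) : Nat → Int → Int → Int × Int
  | 0, y, x => (y, x)
  | fuel + 1, y, x =>
    match pvParent land H W y x with
    | none => (y, x)
    | some p => pvFind land H W fuel p.1 p.2

def watershed_alt (land : List (List Int)) : List (List String) :=
  let ALPHABET := "abcdefghijklmnopqrstuvwxyz"
  let H := land.length
  let W := (PySem.List.pyGetD land 0 []).length
  let fin := (PySem.List.pyRange 0 (H : Int) 1).foldl
    (fun (st : List (List String) × PySem.Dict (Int × Int) String) y =>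
      let inner := (PySem.List.pyRange 0 (W : Int) 1).foldl
        (fun (rs : List String × PySem.Dict (Int × Int) String) x =>
          let r := pvFind land H W (H * W) y x
          let d := if rs.2.contains r then rs.2
                   else rs.2.insert r
                     (((PySem.Str.pyGet? ALPHABET (rs.2.size : Int)).map Char.toString).getD "#")
          (rs.1 ++ [d.getD r "#"], d))
        ([], st.2)
      (st.1 ++ [inner.1], inner.2))
    ([], PySem.Dict.empty)
  fin.1

-- ===== PRECONDITION & SPEC =====
-- the row-major list of all cell coordinates of an H×W grid
def allCells (H W : Nat) : List (Int × Int) :=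
  (PySem.List.pyRange 0 (H : Int) 1).flatMap
    (fun y => (PySem.List.pyRange 0 (W : Int) 1).map (fun x => (y, x)))

-- cell c has a strictly lower in-bounds 4-neighbour (local check, no algorithm)
def pvHasLower (land : List (List Int)) (W : Nat) (c : Int × Int) : Bool :=
  [(c.1, c.2 - 1), (c.1 - 1, c.2), (c.1 + 1, c.2), (c.1, c.2 + 1)].any
    (fun p => decide (0 ≤ p.1 ∧ p.1 < (land.length : Int) ∧ 0 ≤ p.2 ∧ p.2 < (W : Int) ∧
      readCell land p.1 p.2 < readCell land c.1 c.2))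

-- Pre_: grids must be nonempty, rectangular, and have at most 26 regions.  On any
-- ragged grid A raises IndexError while indexing, and with more than 26 regions A
-- raises IndexError at ALPHABET[letter] (the 27th region has no letter); the only
-- excluded input on which A returns is the degenerate empty grid [], where A happens
-- to return [] while B's natural len(land[0]) raises IndexError.
def Pre_watershed (land : List (List Int)) : Prop :=
  land ≠ [] ∧ (∀ row ∈ land, row.length = (land.headD []).length) ∧
  (allCells land.length (land.headD []).length).countP
    (fun c => ¬ pvHasLower land (land.headD []).length c) ≤ 26

instance (land : List (List Int)) : Decidable (Pre_watershed land) := by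
  unfold Pre_watershed; infer_instance

def pvWitness_watershed : List (List Int) := [[1, 2], [2, 1]]

def Spec_watershed (land : List (List Int)) (out : List (List String)) : Prop := out = watershed_alt land
instance (land : List (List Int)) (out : List (List String)) : Decidable (Spec_watershed land out) := by unfold Spec_watershed; infer_instance

-- ===== CLAIM (what is proved, stated in full; the proofs are below) =====
def Claim_equal_watershed : Prop := ∀ (land : List (List Int)), Dom_watershed land → Pre_watershed land → Spec_watershed land (watershed land)

-- ===== LEMMAS AND PROOFS =====

-- abbreviations for the proof
def trip (land : List (List Int)) (c : Int × Int) : Int × Int × Int :=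
  (readCell land c.1 c.2, c.1, c.2)
def keyc (land : List (List Int)) (c : Int × Int) : Int ×ₗ (Int ×ₗ Int) :=
  pyLex3 (trip land c)
def inB (H W : Nat) (c : Int × Int) : Prop :=
  0 ≤ c.1 ∧ c.1 < (H : Int) ∧ 0 ≤ c.2 ∧ c.2 < (W : Int)
def rankc (land : List (List Int)) (H W : Nat) (c : Int × Int) : Nat :=
  (allCells H W).countP (fun c' => keyc land c' < keyc land c)
def rootc (land : List (List Int)) (H W : Nat) (c : Int × Int) : Int × Int :=
  pvFind land H W (rankc land H W c + 1) c.1 c.2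
def rootsL (land : List (List Int)) (H W : Nat) : List (Int × Int) :=
  (allCells H W).filter (fun c => (pvParent land H W c.1 c.2).isNone)
def idxr (land : List (List Int)) (H W : Nat) (r : Int × Int) : Nat :=
  (rootsL land H W).countP (fun r' => keyc land r' < keyc land r)


theorem pv_countP_lt_countP {α : Type} (l : List α) (P Q : α → Bool)
    (h : ∀ a, P a → Q a) (x : α) (hx : x ∈ l) (hQ : Q x) (hP : ¬ P x) :
    l.countP P < l.countP Q := by
  induction l with
  | nil => cases hx
  | cons a t ih =>
    simp only [List.countP_cons]
    rcases List.mem_cons.mp hx with rfl | hmem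
    · simp only [hP, if_false, hQ, if_true, decide_true]
      have : t.countP P ≤ t.countP Q := List.countP_mono_left (fun a _ => h a)
      simp [hP, hQ]; omega
    · have := ih hmem
      by_cases hPa : P a
      · simp [hPa, h a hPa]; omega
      · simp [hPa]; split <;> omega

theorem pv_countP_lt_length {α : Type} (l : List α) (P : α → Bool)
    (x : α) (hx : x ∈ l) (hP : ¬ P x) : l.countP P < l.length := by
  rw [List.countP_eq_length_filter]
  exact List.length_filter_lt_length_iff_exists.mpr ⟨x, hx, hP⟩

theorem allCells_eq_product (H W : Nat) :
    allCells H W = (PySem.List.pyRange 0 (H : Int) 1) ×ˢ (PySem.List.pyRange 0 (W : Int) 1) := rfl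

theorem mem_allCells (H W : Nat) (c : Int × Int) : c ∈ allCells H W ↔ inB H W c := by
  rw [allCells_eq_product, List.mem_product]
  simp only [PySem.List.mem_pyRange_one, inB]
  tauto

theorem length_allCells (H W : Nat) : (allCells H W).length = H * W := by
  rw [allCells_eq_product, List.length_product]
  simp [PySem.List.length_pyRange_one]

theorem nodup_allCells (H W : Nat) : (allCells H W).Nodup := by
  rw [allCells_eq_product]
  exact List.Nodup.product (PySem.List.nodup_pyRange_one _ _) (PySem.List.nodup_pyRange_one _ _)

-- keyc is injective (the coordinates are part of the key)
theorem keyc_inj (land : List (List Int)) (c c' : Int × Int)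
    (h : keyc land c = keyc land c') : c = c' := by
  simp only [keyc, pyLex3, trip] at h
  have := congrArg ofLex h
  simp only [ofLex_toLex, Prod.mk.injEq] at this
  obtain ⟨-, h2⟩ := this
  have := congrArg ofLex h2
  simp only [ofLex_toLex, Prod.mk.injEq] at this
  exact Prod.ext this.1 this.2

-- the 4 neighbour candidates of a cell, in both programs' order
def cand (c : Int × Int) : List (Int × Int) :=
  [(c.1, c.2 - 1), (c.1 - 1, c.2), (c.1 + 1, c.2), (c.1, c.2 + 1)]

theorem cand_symm (c p : Int × Int) : p ∈ cand c ↔ c ∈ cand p := by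
  cases c with | mk y x => cases p with | mk v u =>
    simp [cand, Prod.ext_iff]
    omega

theorem self_not_mem_cand (c : Int × Int) : c ∉ cand c := by
  cases c with | mk y x =>
    simp [cand, Prod.ext_iff]
    omega

-- "good" candidate for pvParent at cell c: in bounds and strictly lower
def goodN (land : List (List Int)) (H W : Nat) (c p : Int × Int) : Prop :=
  inB H W p ∧ readCell land p.1 p.2 < readCell land c.1 c.2

theorem keyc_lt_of_goodN (land : List (List Int)) (H W : Nat) (c p : Int × Int)
    (h : goodN land H W c p) : keyc land p < keyc land c := by
  simp only [keyc, pyLex3, trip]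
  rw [Prod.Lex.toLex_lt_toLex]
  exact Or.inl h.2

def pvStep (land : List (List Int)) (H W : Nat) (y x : Int) :
    Option (Int × Int) → Int × Int → Option (Int × Int) := fun best vu =>
  let v := vu.1; let u := vu.2
  if 0 ≤ v ∧ v < (H : Int) ∧ 0 ≤ u ∧ u < (W : Int) ∧ readCell land v u < readCell land y x then
    match best with
    | none => some (v, u)
    | some b =>
      if pyLex3 (readCell land v u, v, u) < pyLex3 (readCell land b.1 b.2, b.1, b.2) then
        some (v, u)
      else best
  else best

theorem pvParent_eq_foldl (land : List (List Int)) (H W : Nat) (y x : Int) :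
    pvParent land H W y x = (cand (y, x)).foldl (pvStep land H W y x) none := rfl

theorem pvParent_fold_spec (land : List (List Int)) (H W : Nat) (y x : Int)
    (ns : List (Int × Int)) (b : Option (Int × Int))
    (hb : ∀ p, b = some p → goodN land H W (y, x) p) :
    (∀ p, ns.foldl (pvStep land H W y x) b = some p →
        goodN land H W (y, x) p ∧ (p ∈ ns ∨ b = some p)) ∧
    (ns.foldl (pvStep land H W y x) b = none →
        b = none ∧ ∀ n ∈ ns, ¬ goodN land H W (y, x) n) ∧
    (∀ n ∈ ns, goodN land H W (y, x) n →
        ∃ p, ns.foldl (pvStep land H W y x) b = some p ∧ keyc land p ≤ keyc land n) ∧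
    (∀ p q, b = some p → ns.foldl (pvStep land H W y x) b = some q →
        keyc land q ≤ keyc land p) := by
  induction ns generalizing b with
  | nil =>
    refine ⟨fun p hp => ⟨hb p hp, Or.inr hp⟩, fun h => ⟨h, by simp⟩, by simp, ?_⟩
    intro p q hp hq
    simp only [List.foldl_nil] at hq
    rw [hp] at hq; cases hq; exact le_refl _
  | cons n ns ih =>
    set step := pvStep land H W y x with hstepdef
    have hstep : (goodN land H W (y, x) n ∧
        ((step b n = some n ∧ ∀ p, b = some p → keyc land n ≤ keyc land p) ∨
         (step b n = b ∧ ∃ p, b = some p ∧ keyc land p ≤ keyc land n))) ∨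
        (¬ goodN land H W (y, x) n ∧ step b n = b) := by
      by_cases hg : goodN land H W (y, x) n
      · left
        refine ⟨hg, ?_⟩
        have hg' : (0 ≤ n.1 ∧ n.1 < (H : Int) ∧ 0 ≤ n.2 ∧ n.2 < (W : Int) ∧
            readCell land n.1 n.2 < readCell land y x) := by
          obtain ⟨⟨a1, a2, a3, a4⟩, a5⟩ := hg; exact ⟨a1, a2, a3, a4, a5⟩
        cases b with
        | none =>
          left
          constructor
          · simp only [hstepdef, pvStep, if_pos hg']
          · intro p hp; cases hp
        | some bb =>
          by_cases hlt : pyLex3 (readCell land n.1 n.2, n.1, n.2) <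
              pyLex3 (readCell land bb.1 bb.2, bb.1, bb.2)
          · left
            constructor
            · simp only [hstepdef, pvStep, if_pos hg', if_pos hlt]
            · intro p hp
              cases hp
              exact le_of_lt hlt
          · right
            refine ⟨by simp only [hstepdef, pvStep, if_pos hg', if_neg hlt], bb, rfl, ?_⟩
            exact le_of_not_gt hlt
      · right
        refine ⟨hg, ?_⟩
        have hg' : ¬ (0 ≤ n.1 ∧ n.1 < (H : Int) ∧ 0 ≤ n.2 ∧ n.2 < (W : Int) ∧
            readCell land n.1 n.2 < readCell land y x) := by
          intro ⟨a1, a2, a3, a4, a5⟩; exact hg ⟨⟨a1, a2, a3, a4⟩, a5⟩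
        cases b <;> simp only [hstepdef, pvStep, if_neg hg']
    have hb' : ∀ p, step b n = some p → goodN land H W (y, x) p := by
      intro p hp
      rcases hstep with ⟨hg, hc | hc⟩ | ⟨hg, hc⟩
      · rw [hc.1] at hp; cases hp; exact hg
      · rw [hc.1] at hp; exact hb p hp
      · rw [hc] at hp; exact hb p hp
    obtain ⟨I1, I2, I3, I4⟩ := ih (step b n) hb'
    simp only [List.foldl_cons]
    refine ⟨?_, ?_, ?_, ?_⟩
    · intro p hp
      obtain ⟨hgp, hmem | hbp⟩ := I1 p hp
      · exact ⟨hgp, Or.inl (List.mem_cons_of_mem _ hmem)⟩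
      · rcases hstep with ⟨hg, hc | hc⟩ | ⟨hg, hc⟩
        · rw [hc.1] at hbp; cases hbp; exact ⟨hgp, Or.inl List.mem_cons_self⟩
        · rw [hc.1] at hbp; exact ⟨hgp, Or.inr hbp⟩
        · rw [hc] at hbp; exact ⟨hgp, Or.inr hbp⟩
    · intro hnone
      obtain ⟨hsn, hns⟩ := I2 hnone
      rcases hstep with ⟨hg, hc | hc⟩ | ⟨hg, hc⟩
      · rw [hc.1] at hsn; cases hsn
      · rw [hc.1] at hsn
        refine ⟨hsn, ?_⟩
        obtain ⟨p, hp, -⟩ := hc.2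
        rw [hsn] at hp; cases hp
      · rw [hc] at hsn
        refine ⟨hsn, fun m hm hgm => ?_⟩
        rcases List.mem_cons.mp hm with rfl | hm'
        · exact hg hgm
        · exact hns m hm' hgm
    · intro m hm hgm
      rcases List.mem_cons.mp hm with rfl | hm'
      · rcases hstep with ⟨hg, hc | hc⟩ | ⟨hg, hc⟩
        · cases hr : ns.foldl step (step b m) with
          | none => obtain ⟨h0, -⟩ := I2 hr; rw [hc.1] at h0; cases h0
          | some q => exact ⟨q, rfl, I4 m q hc.1 hr⟩
        · obtain ⟨p, hp, hpk⟩ := hc.2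
          cases hr : ns.foldl step (step b m) with
          | none => obtain ⟨h0, -⟩ := I2 hr; rw [hc.1] at h0; rw [h0] at hp; cases hp
          | some q => exact ⟨q, rfl, le_trans (I4 p q (hc.1.trans hp) hr) hpk⟩
        · exact absurd hgm hg
      · exact I3 m hm' hgm
    · intro p q hp hq
      rcases hstep with ⟨hg, hc | hc⟩ | ⟨hg, hc⟩
      · exact le_trans (I4 n q hc.1 hq) (hc.2 p hp)
      · exact I4 p q (hc.1.trans hp) hq
      · exact I4 p q (hc.trans hp) hq

theorem pvParent_none_iff (land : List (List Int)) (H W : Nat) (y x : Int) :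
    pvParent land H W y x = none ↔ ∀ n ∈ cand (y, x), ¬ goodN land H W (y, x) n := by
  rw [pvParent_eq_foldl]
  obtain ⟨I1, I2, I3, I4⟩ := pvParent_fold_spec land H W y x (cand (y, x)) none
    (by intro p hp; cases hp)
  constructor
  · intro h; exact (I2 h).2
  · intro h
    cases hr : (cand (y, x)).foldl (pvStep land H W y x) none with
    | none => rfl
    | some p =>
      obtain ⟨hg, hm | hm⟩ := I1 p hr
      · exact absurd hg (h p hm)
      · cases hm

theorem pvParent_some_spec (land : List (List Int)) (H W : Nat) (y x : Int) (p : Int × Int)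
    (h : pvParent land H W y x = some p) :
    goodN land H W (y, x) p ∧ p ∈ cand (y, x) ∧
      ∀ n ∈ cand (y, x), goodN land H W (y, x) n → keyc land p ≤ keyc land n := by
  rw [pvParent_eq_foldl] at h
  obtain ⟨I1, I2, I3, I4⟩ := pvParent_fold_spec land H W y x (cand (y, x)) none
    (by intro p hp; cases hp)
  obtain ⟨hg, hm | hm⟩ := I1 p h
  · refine ⟨hg, hm, fun n hn hgn => ?_⟩
    obtain ⟨q, hq, hqk⟩ := I3 n hn hgn
    rw [h] at hq; cases hq; exact hqk
  · cases hm

theorem rankc_lt_of_keyc_lt (land : List (List Int)) (H W : Nat) (p c : Int × Int)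
    (hp : p ∈ allCells H W) (h : keyc land p < keyc land c) :
    rankc land H W p < rankc land H W c := by
  apply pv_countP_lt_countP _ _ _ _ p hp
  · exact decide_eq_true h
  · simp only [decide_eq_true_eq]; exact lt_irrefl _
  · intro a ha
    simp only [decide_eq_true_eq] at *
    exact lt_trans ha h

theorem inB_mem_allCells (H W : Nat) (c : Int × Int) (h : inB H W c) : c ∈ allCells H W :=
  (mem_allCells H W c).mpr h

theorem rankc_parent_lt (land : List (List Int)) (H W : Nat) (c p : Int × Int)
    (hp : pvParent land H W c.1 c.2 = some p) :
    rankc land H W p < rankc land H W c := by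
  obtain ⟨hg, -, -⟩ := pvParent_some_spec land H W c.1 c.2 p hp
  exact rankc_lt_of_keyc_lt land H W p c (inB_mem_allCells H W p hg.1)
    (keyc_lt_of_goodN land H W (c.1, c.2) p hg)

theorem rankc_lt_HW (land : List (List Int)) (H W : Nat) (c : Int × Int)
    (hc : c ∈ allCells H W) : rankc land H W c < H * W := by
  rw [← length_allCells H W]
  apply pv_countP_lt_length _ _ c hc
  simp only [decide_eq_true_eq]; exact lt_irrefl _

theorem pvFind_congr (land : List (List Int)) (H W : Nat) :
    ∀ (f1 f2 : Nat) (c : Int × Int), rankc land H W c < f1 → rankc land H W c < f2 →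
      pvFind land H W f1 c.1 c.2 = pvFind land H W f2 c.1 c.2 := by
  intro f1
  induction f1 with
  | zero => intro f2 c h1; omega
  | succ f1 ih =>
    intro f2 c h1 h2
    cases f2 with
    | zero => omega
    | succ f2 =>
      simp only [pvFind]
      cases hp : pvParent land H W c.1 c.2 with
      | none => rfl
      | some p =>
        have hlt := rankc_parent_lt land H W c p hp
        exact ih f2 p (by omega) (by omega)

theorem pvFind_eq_rootc (land : List (List Int)) (H W : Nat) (fuel : Nat) (c : Int × Int)
    (hf : rankc land H W c < fuel) :
    pvFind land H W fuel c.1 c.2 = rootc land H W c :=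
  pvFind_congr land H W fuel (rankc land H W c + 1) c hf (Nat.lt_succ_self _)

theorem rootc_of_parent_none (land : List (List Int)) (H W : Nat) (c : Int × Int)
    (h : pvParent land H W c.1 c.2 = none) : rootc land H W c = c := by
  simp [rootc, pvFind, h]

theorem rootc_parent (land : List (List Int)) (H W : Nat) (c p : Int × Int)
    (h : pvParent land H W c.1 c.2 = some p) : rootc land H W c = rootc land H W p := by
  have h1 : rootc land H W c = pvFind land H W (rankc land H W c) p.1 p.2 := by
    simp [rootc, pvFind, h]
  rw [h1]
  exact pvFind_eq_rootc land H W _ p (rankc_parent_lt land H W c p h)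

theorem rootc_is_root (land : List (List Int)) (H W : Nat) (c : Int × Int)
    (hc : c ∈ allCells H W) :
    rootc land H W c ∈ allCells H W ∧
      pvParent land H W (rootc land H W c).1 (rootc land H W c).2 = none := by
  generalize hn : rankc land H W c = n
  induction n using Nat.strong_induction_on generalizing c with
  | _ n ih =>
    cases hp : pvParent land H W c.1 c.2 with
    | none => rw [rootc_of_parent_none land H W c hp]; exact ⟨hc, hp⟩
    | some p =>
      rw [rootc_parent land H W c p hp]
      have hlt := rankc_parent_lt land H W c p hp
      obtain ⟨hg, -, -⟩ := pvParent_some_spec land H W c.1 c.2 p hp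
      exact ih _ (hn ▸ hlt) p (inB_mem_allCells H W p hg.1) rfl

theorem mem_rootsL_iff (land : List (List Int)) (H W : Nat) (r : Int × Int) :
    r ∈ rootsL land H W ↔ r ∈ allCells H W ∧ pvParent land H W r.1 r.2 = none := by
  simp [rootsL, List.mem_filter, Option.isNone_iff_eq_none]

theorem rootc_mem_rootsL (land : List (List Int)) (H W : Nat) (c : Int × Int)
    (hc : c ∈ allCells H W) : rootc land H W c ∈ rootsL land H W := by
  rw [mem_rootsL_iff]
  exact rootc_is_root land H W c hc

theorem idxr_lt_length (land : List (List Int)) (H W : Nat) (r : Int × Int)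
    (hr : r ∈ rootsL land H W) : idxr land H W r < (rootsL land H W).length := by
  apply pv_countP_lt_length _ _ r hr
  simp only [decide_eq_true_eq]; exact lt_irrefl _

theorem idxr_inj (land : List (List Int)) (H W : Nat) (r r' : Int × Int)
    (hr : r ∈ rootsL land H W) (hr' : r' ∈ rootsL land H W)
    (h : idxr land H W r = idxr land H W r') : r = r' := by
  by_contra hne
  have hkne : keyc land r ≠ keyc land r' := fun he => hne (keyc_inj land r r' he)
  rcases lt_or_gt_of_ne hkne with hlt | hlt
  · have : idxr land H W r < idxr land H W r' := by
      apply pv_countP_lt_countP _ _ _ _ r hr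
      · exact decide_eq_true hlt
      · simp only [decide_eq_true_eq]; exact lt_irrefl _
      · intro a ha; simp only [decide_eq_true_eq] at *; exact lt_trans ha hlt
    omega
  · have : idxr land H W r' < idxr land H W r := by
      apply pv_countP_lt_countP _ _ _ _ r' hr'
      · exact decide_eq_true hlt
      · simp only [decide_eq_true_eq]; exact lt_irrefl _
      · intro a ha; simp only [decide_eq_true_eq] at *; exact lt_trans ha hlt
    omega

-- grid shape and cell read/write lemmas
def Shape {α : Type} (m : List (List α)) (H W : Nat) : Prop :=
  m.length = H ∧ ∀ row ∈ m, row.length = W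

theorem shape_replicate {α : Type} (H W : Nat) (a : α) :
    Shape (List.replicate H (List.replicate W a)) H W := by
  constructor
  · simp
  · intro row hrow
    rw [List.eq_of_mem_replicate hrow]
    simp

theorem readCell_eq_getElem {α : Type} [Inhabited α] (m : List (List α)) (H W : Nat)
    (hs : Shape m H W) (y x : Int) (h : inB H W (y, x)) :
    readCell m y x = ((m.getD y.toNat []).getD x.toNat default) := by
  obtain ⟨h1, h2, h3, h4⟩ := h
  rw [readCell, PySem.List.pyGetD_of_nonneg _ _ h1, PySem.List.pyGetD_of_nonneg _ _ h3]

theorem getD_row_length {α : Type} (m : List (List α)) (H W : Nat) (hs : Shape m H W)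
    (n : Nat) (hn : n < H) : (m.getD n []).length = W := by
  have hn' : n < m.length := by rw [hs.1]; exact hn
  rw [List.getD_eq_getElem _ _ hn']
  exact hs.2 _ (List.getElem_mem hn')

theorem pv_getD_set_self {α : Type} (m : List α) (n : Nat) (r : α) (d : α)
    (h : n < m.length) : (m.set n r).getD n d = r := by
  rw [List.getD_eq_getElem _ _ (by simpa using h), List.getElem_set_self]

theorem pv_getD_set_ne {α : Type} (m : List α) (n n' : Nat) (r : α) (d : α)
    (h : n' ≠ n) : (m.set n r).getD n' d = m.getD n' d := by
  by_cases hlt : n' < m.length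
  · rw [List.getD_eq_getElem _ _ (by simpa using hlt), List.getD_eq_getElem _ _ hlt,
        List.getElem_set_ne (by omega)]
  · rw [List.getD_eq_default _ _ (by simp; omega), List.getD_eq_default _ _ (by omega)]

theorem shape_setCell {α : Type} (m : List (List α)) (H W : Nat) (hs : Shape m H W)
    (y x : Int) (h : inB H W (y, x)) (v : α) : Shape (setCell m y x v) H W := by
  obtain ⟨h1, h2, h3, h4⟩ := h
  constructor
  · simp [setCell, hs.1]
  · intro row hrow
    rcases List.mem_or_eq_of_mem_set hrow with hmem | rfl
    · exact hs.2 _ hmem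
    · rw [List.length_set]
      exact getD_row_length m H W hs y.toNat (by omega)

theorem readCell_setCell_self {α : Type} [Inhabited α] (m : List (List α)) (H W : Nat)
    (hs : Shape m H W) (y x : Int) (h : inB H W (y, x)) (v : α) :
    readCell (setCell m y x v) y x = v := by
  obtain ⟨h1, h2, h3, h4⟩ := h
  have hy : y.toNat < m.length := by rw [hs.1]; omega
  have hx : x.toNat < (m.getD y.toNat []).length := by
    rw [getD_row_length m H W hs y.toNat (by omega)]; omega
  rw [readCell_eq_getElem _ H W (shape_setCell m H W hs y x ⟨h1, h2, h3, h4⟩ v) y x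
    ⟨h1, h2, h3, h4⟩]
  rw [setCell, pv_getD_set_self _ _ _ _ hy, pv_getD_set_self _ _ _ _ hx]

theorem readCell_setCell_ne {α : Type} [Inhabited α] (m : List (List α)) (H W : Nat)
    (hs : Shape m H W) (y x y' x' : Int) (h : inB H W (y, x)) (h' : inB H W (y', x'))
    (hne : (y', x') ≠ (y, x)) (v : α) :
    readCell (setCell m y x v) y' x' = readCell m y' x' := by
  obtain ⟨h1, h2, h3, h4⟩ := h
  obtain ⟨g1, g2, g3, g4⟩ := h'
  have hy : y.toNat < m.length := by rw [hs.1]; omega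
  rw [readCell_eq_getElem _ H W (shape_setCell m H W hs y x ⟨h1, h2, h3, h4⟩ v) y' x'
    ⟨g1, g2, g3, g4⟩, readCell_eq_getElem _ H W hs y' x' ⟨g1, g2, g3, g4⟩]
  by_cases hyy : y'.toNat = y.toNat
  · have hxx : x'.toNat ≠ x.toNat := by
      intro he
      exact hne (by
        have : y' = y := by omega
        have : x' = x := by omega
        simp_all)
    rw [setCell, hyy, pv_getD_set_self _ _ _ _ hy, pv_getD_set_ne _ _ _ _ _ hxx]
  · rw [setCell, pv_getD_set_ne _ _ _ _ _ hyy]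

theorem readCell_replicate {α : Type} [Inhabited α] (H W : Nat) (a : α) (y x : Int)
    (h : inB H W (y, x)) :
    readCell (List.replicate H (List.replicate W a)) y x = a := by
  obtain ⟨h1, h2, h3, h4⟩ := h
  rw [readCell_eq_getElem _ H W (shape_replicate H W a) y x ⟨h1, h2, h3, h4⟩]
  have h5 : (List.replicate H (List.replicate W a)).getD y.toNat [] = List.replicate W a := by
    rw [List.getD_eq_getElem _ _ (by simp; omega), List.getElem_replicate]
  rw [h5, List.getD_eq_getElem _ _ (by simp; omega), List.getElem_replicate]
-- characterisation of A's get_neighbors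
theorem gn_fold (g : List (List Int)) (x y : Int) (ds : List (Int × Int))
    (acc : List (Int × Int)) :
    ds.foldl (fun acc d =>
      let u := x + d.1
      let v := y + d.2
      if u < 0 ∨ u ≥ ((PySem.List.pyGetD g 0 []).length : Int) then acc
      else if v < 0 ∨ v ≥ (g.length : Int) then acc
      else acc ++ [(u, v)]) acc =
    acc ++ (ds.map (fun d => (x + d.1, y + d.2))).filter
      (fun uv => decide (0 ≤ uv.1 ∧ uv.1 < ((PySem.List.pyGetD g 0 []).length : Int) ∧
        0 ≤ uv.2 ∧ uv.2 < (g.length : Int))) := by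
  induction ds generalizing acc with
  | nil => simp
  | cons d ds ih =>
    simp only [List.foldl_cons, List.map_cons, List.filter_cons]
    by_cases h1 : x + d.1 < 0 ∨ x + d.1 ≥ ((PySem.List.pyGetD g 0 []).length : Int)
    · rw [if_pos h1, ih]
      have : ¬ (0 ≤ x + d.1 ∧ x + d.1 < ((PySem.List.pyGetD g 0 []).length : Int) ∧
          0 ≤ y + d.2 ∧ y + d.2 < (g.length : Int)) := by omega
      simp [this]
    · rw [if_neg h1]
      by_cases h2 : y + d.2 < 0 ∨ y + d.2 ≥ (g.length : Int)
      · rw [if_pos h2, ih]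
        have : ¬ (0 ≤ x + d.1 ∧ x + d.1 < ((PySem.List.pyGetD g 0 []).length : Int) ∧
            0 ≤ y + d.2 ∧ y + d.2 < (g.length : Int)) := by omega
        simp [this]
      · rw [if_neg h2, ih]
        have : (0 ≤ x + d.1 ∧ x + d.1 < ((PySem.List.pyGetD g 0 []).length : Int) ∧
            0 ≤ y + d.2 ∧ y + d.2 < (g.length : Int)) := by omega
        simp [this]

theorem get_neighbors_eq (g : List (List Int)) (x y : Int) :
    get_neighbors g x y =
      ([((-1 : Int), (0 : Int)), (0, -1), (0, 1), (1, 0)].map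
        (fun d => (x + d.1, y + d.2))).filter
        (fun uv => decide (0 ≤ uv.1 ∧ uv.1 < ((PySem.List.pyGetD g 0 []).length : Int) ∧
          0 ≤ uv.2 ∧ uv.2 < (g.length : Int))) := by
  rw [get_neighbors, gn_fold]
  simp

theorem mem_get_neighbors (g : List (List Int)) (H W : Nat) (hH : g.length = H)
    (hW0 : (PySem.List.pyGetD g 0 []).length = W) (x y u v : Int) :
    (u, v) ∈ get_neighbors g x y ↔ (v, u) ∈ cand (y, x) ∧ inB H W (v, u) := by
  rw [get_neighbors_eq, List.mem_filter]
  simp only [List.map_cons, List.map_nil, List.mem_cons, List.not_mem_nil, or_false,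
    hH, hW0, cand, inB, decide_eq_true_eq, Prod.mk.injEq, Prod.ext_iff]
  omega

theorem nodup_get_neighbors (g : List (List Int)) (x y : Int) :
    (get_neighbors g x y).Nodup := by
  rw [get_neighbors_eq]
  apply List.Nodup.filter
  apply (List.nodup_map_iff ?_).mpr
  · decide
  · intro a b hab
    simp only [Prod.mk.injEq] at hab
    exact Prod.ext (by omega) (by omega)
theorem trip_inj (land : List (List Int)) (c c' : Int × Int)
    (h : trip land c = trip land c') : c = c' := by
  simp only [trip, Prod.mk.injEq] at h
  exact Prod.ext h.2.1 h.2.2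

-- A's queue is the row-major cell list tagged with levels
theorem queue_eq (land : List (List Int)) (W : Nat)
    (hW : ∀ row ∈ land, row.length = W) :
    ((PySem.List.pyRange 0 (land.length : Int) 1).foldl (fun q y =>
      (PySem.List.pyRange 0 ((PySem.List.pyGetD land y []).length : Int) 1).foldl (fun q x =>
        q ++ [(PySem.List.pyGetD (PySem.List.pyGetD land y []) x 0, y, x)]) q) [] :
      List (Int × Int × Int)) =
    (allCells land.length W).map (trip land) := by
  have hinner : ∀ (q : List (Int × Int × Int)), ∀ y ∈ PySem.List.pyRange 0 (land.length : Int) 1,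
      (PySem.List.pyRange 0 ((PySem.List.pyGetD land y []).length : Int) 1).foldl (fun q x =>
        q ++ [(PySem.List.pyGetD (PySem.List.pyGetD land y []) x 0, y, x)]) q
      = q ++ ((PySem.List.pyRange 0 (W : Int) 1).map (fun x => trip land (y, x))) := by
    intro q y hy
    rw [PySem.List.mem_pyRange_one] at hy
    have hlen : (PySem.List.pyGetD land y []).length = W := by
      rw [PySem.List.pyGetD_of_nonneg _ _ hy.1]
      exact getD_row_length land land.length W ⟨rfl, hW⟩ y.toNat (by omega)
    rw [hlen, PySem.List.foldl_append_singleton_eq_map]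
    rfl
  rw [PySem.List.foldl_congr_mem _ _
    (fun q y => q ++ ((PySem.List.pyRange 0 (W : Int) 1).map (fun x => trip land (y, x)))) _
    hinner]
  rw [PySem.List.foldl_append_eq_flatMap]
  rw [allCells, List.map_flatMap]
  simp [List.map_map, Function.comp_def]

-- the sorted queue is strictly increasing in the key
theorem sorted_queue_pairwise (land : List (List Int)) (H W : Nat)
    (hq : (PySem.List.sorted ((allCells H W).map (trip land)) pyLex3 false).Perm
      ((allCells H W).map (trip land))) :
    (PySem.List.sorted ((allCells H W).map (trip land)) pyLex3 false).Pairwise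
      (fun a b => pyLex3 a < pyLex3 b) := by
  have hle := PySem.List.sorted_pairwise ((allCells H W).map (trip land)) pyLex3
  have hnd : ((PySem.List.sorted ((allCells H W).map (trip land)) pyLex3 false).map
      pyLex3).Nodup := by
    apply (hq.map pyLex3).nodup_iff.mpr
    rw [List.map_map]
    have : pyLex3 ∘ trip land = keyc land := rfl
    rw [this]
    exact (List.nodup_map_iff (fun a b h => keyc_inj land a b h)).mpr (nodup_allCells H W)
  have hne : (PySem.List.sorted ((allCells H W).map (trip land)) pyLex3 false).Pairwise
      (fun a b => pyLex3 a ≠ pyLex3 b) := List.pairwise_map.mp hnd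
  exact (hle.and hne).imp (fun h => lt_of_le_of_ne h.1 h.2)

theorem pv_countP_succ {α : Type} (l : List α) (P Q : α → Bool) (a : α)
    (hnd : l.Nodup) (ha : a ∈ l) (hPa : P a = false) (hQa : Q a = true)
    (hPQ : ∀ b ∈ l, b ≠ a → P b = Q b) : l.countP Q = l.countP P + 1 := by
  induction l with
  | nil => cases ha
  | cons b l ih =>
    simp only [List.countP_cons]
    rcases List.mem_cons.mp ha with rfl | hmem
    · rw [hPa, hQa]
      simp only [List.nodup_cons] at hnd
      have : l.countP P = l.countP Q := by
        apply List.countP_congr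
        intro x hx
        rw [hPQ x (List.mem_cons_of_mem _ hx) (fun he => hnd.1 (he ▸ hx))]
      simp
      omega
    · simp only [List.nodup_cons] at hnd
      have hba : b ≠ a := fun he => hnd.1 (he ▸ hmem)
      rw [hPQ b List.mem_cons_self hba]
      have := ih hnd.2 hmem (fun x hx hxa => hPQ x (List.mem_cons_of_mem _ hx) hxa)
      omega

def trigc (land : List (List Int)) (H W : Nat) (c : Int × Int) : Int × Int :=
  match pvParent land H W c.1 c.2 with
  | none => c
  | some p => p

theorem trigc_mem (land : List (List Int)) (H W : Nat) (c : Int × Int)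
    (hc : c ∈ allCells H W) : trigc land H W c ∈ allCells H W := by
  rw [trigc]
  cases hp : pvParent land H W c.1 c.2 with
  | none => exact hc
  | some p =>
    obtain ⟨hg, -, -⟩ := pvParent_some_spec land H W c.1 c.2 p hp
    exact inB_mem_allCells H W p hg.1

theorem nodup_rootsL (land : List (List Int)) (H W : Nat) : (rootsL land H W).Nodup :=
  (nodup_allCells H W).filter _

theorem rootsL_sub (land : List (List Int)) (H W : Nat) (r : Int × Int)
    (hr : r ∈ rootsL land H W) : r ∈ allCells H W :=
  ((mem_rootsL_iff land H W r).mp hr).1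
def spreadStep (land : List (List Int)) (level y x : Int) :
    (List (List Int) × Int) → (Int × Int) → (List (List Int) × Int) := fun st2 uv =>
  let u := uv.1; let v := uv.2
  if readCell st2.1 v u = -1 ∧ level < readCell land v u then
    (setCell st2.1 v u (readCell st2.1 y x), st2.2)
  else st2

def aStep (land : List (List Int)) :
    (List (List Int) × Int) → (Int × Int × Int) → (List (List Int) × Int) := fun st t =>
  let level := t.1; let y := t.2.1; let x := t.2.2
  let st1 : List (List Int) × Int :=
    if readCell st.1 y x = -1 then (setCell st.1 y x st.2, st.2 + 1) else st
  (get_neighbors st1.1 x y).foldl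
    (fun st2 uv =>
      let u := uv.1; let v := uv.2
      if readCell st2.1 v u = -1 ∧ level < readCell land v u then
        (setCell st2.1 v u (readCell st2.1 y x), st2.2)
      else st2) st1

theorem spread_fold (land : List (List Int)) (H W : Nat) (level : Int) (c₀ : Int × Int)
    (hc₀ : inB H W c₀) (ns : List (Int × Int))
    (hmem : ∀ uv ∈ ns, (uv.2, uv.1) ∈ cand c₀ ∧ inB H W (uv.2, uv.1))
    (hnd : ns.Nodup) :
    ∀ (inter : List (List Int)) (cur : Int), Shape inter H W →
    Shape ((ns.foldl (spreadStep land level c₀.1 c₀.2) (inter, cur)).1) H W ∧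
    (ns.foldl (spreadStep land level c₀.1 c₀.2) (inter, cur)).2 = cur ∧
    ∀ c : Int × Int, inB H W c →
      readCell (ns.foldl (spreadStep land level c₀.1 c₀.2) (inter, cur)).1 c.1 c.2 =
        if (c.2, c.1) ∈ ns ∧ readCell inter c.1 c.2 = -1 ∧ level < readCell land c.1 c.2
        then readCell inter c₀.1 c₀.2 else readCell inter c.1 c.2 := by
  induction ns with
  | nil => intro inter cur hs; exact ⟨hs, rfl, by intro c hc; simp⟩
  | cons uv ns ih =>
    obtain ⟨u, v⟩ := uv
    intro inter cur hs
    obtain ⟨hcand, hbv⟩ := hmem (u, v) List.mem_cons_self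
    have hne0 : ((v : Int), (u : Int)) ≠ c₀ := by
      intro he; exact self_not_mem_cand c₀ (he ▸ hcand)
    simp only [List.nodup_cons] at hnd
    have hmem' : ∀ w ∈ ns, (w.2, w.1) ∈ cand c₀ ∧ inB H W (w.2, w.1) :=
      fun w hw => hmem w (List.mem_cons_of_mem _ hw)
    simp only [List.foldl_cons]
    by_cases hcond : readCell inter v u = -1 ∧ level < readCell land v u
    · have hstep : spreadStep land level c₀.1 c₀.2 (inter, cur) (u, v) =
          (setCell inter v u (readCell inter c₀.1 c₀.2), cur) := by
        simp only [spreadStep, if_pos hcond]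
      rw [hstep]
      have hs' : Shape (setCell inter v u (readCell inter c₀.1 c₀.2)) H W :=
        shape_setCell inter H W hs v u hbv _
      obtain ⟨J1, J2, J3⟩ := ih hmem' hnd.2 _ cur hs'
      refine ⟨J1, J2, ?_⟩
      rintro ⟨cy, cx⟩ hc
      rw [J3 (cy, cx) hc]
      have hread0 : readCell (setCell inter v u (readCell inter c₀.1 c₀.2)) c₀.1 c₀.2 =
          readCell inter c₀.1 c₀.2 := by
        apply readCell_setCell_ne inter H W hs _ _ _ _ hbv hc₀
        intro he
        apply hne0
        rw [← he]
      by_cases hcc : cy = v ∧ cx = u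
      · obtain ⟨rfl, rfl⟩ := hcc
        have hnotin : ((cx : Int), (cy : Int)) ∉ ns := hnd.1
        rw [if_neg (fun h => hnotin h.1), if_pos ⟨List.mem_cons_self, hcond.1, hcond.2⟩]
        exact readCell_setCell_self inter H W hs _ _ hbv _
      · have hne : ((cy : Int), (cx : Int)) ≠ (v, u) := by
          intro he; simp only [Prod.mk.injEq] at he; exact hcc he
        have hrc : readCell (setCell inter v u (readCell inter c₀.1 c₀.2)) cy cx =
            readCell inter cy cx := by
          apply readCell_setCell_ne inter H W hs _ _ _ _ hbv hc
          exact hne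
        rw [hrc, hread0]
        have hmemiff : ((cx : Int), (cy : Int)) ∈ (u, v) :: ns ↔ ((cx : Int), (cy : Int)) ∈ ns := by
          simp only [List.mem_cons, or_iff_right_iff_imp]
          intro he
          simp only [Prod.mk.injEq] at he
          exact absurd ⟨he.2, he.1⟩ hcc
        by_cases hin : ((cx : Int), (cy : Int)) ∈ ns ∧ readCell inter cy cx = -1 ∧
            level < readCell land cy cx
        · rw [if_pos hin, if_pos ⟨hmemiff.mpr hin.1, hin.2⟩]
        · rw [if_neg hin, if_neg (fun h => hin ⟨hmemiff.mp h.1, h.2⟩)]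
    · have hstep : spreadStep land level c₀.1 c₀.2 (inter, cur) (u, v) = (inter, cur) := by
        simp only [spreadStep, if_neg hcond]
      rw [hstep]
      obtain ⟨J1, J2, J3⟩ := ih hmem' hnd.2 inter cur hs
      refine ⟨J1, J2, ?_⟩
      rintro ⟨cy, cx⟩ hc
      rw [J3 (cy, cx) hc]
      by_cases hcc : cy = v ∧ cx = u
      · obtain ⟨rfl, rfl⟩ := hcc
        have hnotin : ((cx : Int), (cy : Int)) ∉ ns := hnd.1
        rw [if_neg (fun h => hnotin h.1), if_neg (fun h => hcond ⟨h.2.1, h.2.2⟩)]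
      · have hmemiff : ((cx : Int), (cy : Int)) ∈ (u, v) :: ns ↔ ((cx : Int), (cy : Int)) ∈ ns := by
          simp only [List.mem_cons, or_iff_right_iff_imp]
          intro he
          simp only [Prod.mk.injEq] at he
          exact absurd ⟨he.2, he.1⟩ hcc
        by_cases hin : ((cx : Int), (cy : Int)) ∈ ns ∧ readCell inter cy cx = -1 ∧
            level < readCell land cy cx
        · rw [if_pos hin, if_pos ⟨hmemiff.mpr hin.1, hin.2⟩]
        · rw [if_neg hin, if_neg (fun h => hin ⟨hmemiff.mp h.1, h.2⟩)]
def AInv (land : List (List Int)) (H W : Nat) (s : List (Int × Int × Int))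
    (st : List (List Int) × Int) : Prop :=
  Shape st.1 H W ∧
  st.2 = ((rootsL land H W).countP (fun r => decide (trip land r ∉ s)) : Int) ∧
  ∀ c ∈ allCells H W, readCell st.1 c.1 c.2 =
    (if trip land (trigc land H W c) ∈ s then -1 else ((idxr land H W (rootc land H W c)) : Int))

theorem aInv_fold (land : List (List Int)) (H W : Nat)
    (hlen : land.length = H) (hW : ∀ row ∈ land, row.length = W) (hH0 : 0 < H) :
    ∀ (s : List (Int × Int × Int)) (st : List (List Int) × Int),
      s.Pairwise (fun a b => pyLex3 a < pyLex3 b) →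
      (∀ t ∈ s, ∃ c ∈ allCells H W, t = trip land c) →
      (∀ c ∈ allCells H W, trip land c ∉ s → ∀ t' ∈ s, keyc land c < pyLex3 t') →
      AInv land H W s st →
      AInv land H W [] (s.foldl (aStep land) st) := by
  intro s
  induction s with
  | nil => exact fun st _ _ _ h => h
  | cons t s' ih =>
    intro st hpw hsub hdown hinv
    obtain ⟨c₀, hc₀, rfl⟩ := hsub t List.mem_cons_self
    obtain ⟨hShape, hCur, hRead⟩ := hinv
    have hpwh : ∀ t' ∈ s', pyLex3 (trip land c₀) < pyLex3 t' := (List.pairwise_cons.mp hpw).1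
    have hdone_iff : ∀ c ∈ allCells H W,
        (trip land c ∉ trip land c₀ :: s') ↔ keyc land c < keyc land c₀ := by
      intro c hc
      constructor
      · intro hnot
        exact hdown c hc hnot _ List.mem_cons_self
      · intro hlt hmem
        rcases List.mem_cons.mp hmem with he | hmm
        · rw [keyc, he] at hlt
          exact lt_irrefl _ hlt
        · exact lt_asymm hlt (hpwh _ hmm)
    have hinB₀ : inB H W c₀ := (mem_allCells H W c₀).mp hc₀
    -- the phase-1 state
    set st1 : List (List Int) × Int :=
      (if readCell st.1 c₀.1 c₀.2 = -1 then (setCell st.1 c₀.1 c₀.2 st.2, st.2 + 1) else st)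
      with hst1def
    have hb := hRead c₀ hc₀
    have hcast : ∀ n : Nat, ((n : Int) ≠ -1) := by intro n; omega
    -- unified phase-1 facts
    have phase1 : Shape st1.1 H W ∧
        readCell st1.1 c₀.1 c₀.2 = ((idxr land H W (rootc land H W c₀)) : Int) ∧
        st1.2 = (((rootsL land H W).countP (fun r => decide (trip land r ∉ s'))) : Int) ∧
        (∀ c ∈ allCells H W, c ≠ c₀ → readCell st1.1 c.1 c.2 = readCell st.1 c.1 c.2) := by
      cases hroot : pvParent land H W c₀.1 c₀.2 with
      | none =>
        have htr : trigc land H W c₀ = c₀ := by simp [trigc, hroot]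
        have hmemt : trip land (trigc land H W c₀) ∈ trip land c₀ :: s' := by
          rw [htr]; exact List.mem_cons_self
        rw [if_pos hmemt] at hb
        have hst1 : st1 = (setCell st.1 c₀.1 c₀.2 st.2, st.2 + 1) := by
          rw [hst1def, if_pos hb]
        have hc₀root : c₀ ∈ rootsL land H W := (mem_rootsL_iff land H W c₀).mpr ⟨hc₀, hroot⟩
        have hc₀notins' : trip land c₀ ∉ s' := by
          intro hmm
          exact lt_irrefl _ (hpwh _ hmm)
        have hcur2 : st.2 = ((idxr land H W c₀) : Int) := by
          rw [hCur]
          congr 1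
          apply List.countP_congr
          intro r hr
          simp only [decide_eq_true_eq, idxr]
          exact hdone_iff r (rootsL_sub land H W r hr)
        have hcnt : (rootsL land H W).countP (fun r => decide (trip land r ∉ s')) =
            (rootsL land H W).countP (fun r => decide (trip land r ∉ trip land c₀ :: s')) + 1 := by
          apply pv_countP_succ _ _ _ c₀ (nodup_rootsL land H W) hc₀root
          · simp
          · simpa using hc₀notins'
          · intro b hb hba
            simp only [decide_eq_decide, List.mem_cons, not_or]
            constructor
            · intro h; exact h.2
            · intro h; exact ⟨fun he => hba (trip_inj land b c₀ he), h⟩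
        refine ⟨?_, ?_, ?_, ?_⟩
        · rw [hst1]; exact shape_setCell st.1 H W hShape c₀.1 c₀.2 hinB₀ st.2
        · rw [hst1]
          have := readCell_setCell_self st.1 H W hShape c₀.1 c₀.2 hinB₀ st.2
          rw [this, hcur2, rootc_of_parent_none land H W c₀ hroot]
        · rw [hst1, hcnt, hCur]
          push_cast
          ring
        · intro c hc hne
          rw [hst1]
          apply readCell_setCell_ne st.1 H W hShape _ _ _ _ hinB₀ ((mem_allCells H W c).mp hc)
          intro he
          exact hne (Prod.ext (congrArg Prod.fst he) (congrArg Prod.snd he))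
      | some p =>
        have htr : trigc land H W c₀ = p := by simp [trigc, hroot]
        obtain ⟨hg, hpc, hmin⟩ := pvParent_some_spec land H W c₀.1 c₀.2 p hroot
        have hkp : keyc land p < keyc land c₀ :=
          keyc_lt_of_goodN land H W (c₀.1, c₀.2) p hg
        have hpA : p ∈ allCells H W := inB_mem_allCells H W p hg.1
        have hnotmem : trip land (trigc land H W c₀) ∉ trip land c₀ :: s' := by
          rw [htr]
          exact (hdone_iff p hpA).mpr hkp
        rw [if_neg hnotmem] at hb
        have hst1 : st1 = st := by
          rw [hst1def, if_neg (by rw [hb]; exact hcast _)]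
        have hc₀notroot : c₀ ∉ rootsL land H W := by
          intro hmm
          rw [((mem_rootsL_iff land H W c₀).mp hmm).2] at hroot
          cases hroot
        have hcnt : (rootsL land H W).countP (fun r => decide (trip land r ∉ s')) =
            (rootsL land H W).countP
              (fun r => decide (trip land r ∉ trip land c₀ :: s')) := by
          apply List.countP_congr
          intro r hr
          simp only [decide_eq_true_eq, List.mem_cons, not_or]
          constructor
          · intro h
            refine ⟨fun he => ?_, h⟩
            rw [trip_inj land r c₀ he] at hr
            exact hc₀notroot hr
          · intro h; exact h.2
        refine ⟨?_, ?_, ?_, ?_⟩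
        · rw [hst1]; exact hShape
        · rw [hst1, hb]
        · rw [hst1, hcnt, hCur]
        · intro c hc hne
          rw [hst1]
    obtain ⟨f0, f2, f3, f4⟩ := phase1
    -- phase 2 : the spread over the neighbours
    have hW0 : (PySem.List.pyGetD st1.1 0 []).length = W := by
      rw [PySem.List.pyGetD_of_nonneg _ _ (le_refl (0 : Int))]
      exact getD_row_length st1.1 H W f0 (Int.toNat 0) (by simpa using hH0)
    have hgnm : ∀ uv ∈ get_neighbors st1.1 c₀.2 c₀.1,
        (uv.2, uv.1) ∈ cand c₀ ∧ inB H W (uv.2, uv.1) := by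
      rintro ⟨u, v⟩ huv
      have := (mem_get_neighbors st1.1 H W f0.1 hW0 c₀.2 c₀.1 u v).mp huv
      simpa using this
    have hmemns : ∀ u v : Int, ((u, v) ∈ get_neighbors st1.1 c₀.2 c₀.1 ↔
        (v, u) ∈ cand c₀ ∧ inB H W (v, u)) := by
      intro u v
      have := mem_get_neighbors st1.1 H W f0.1 hW0 c₀.2 c₀.1 u v
      simpa using this
    obtain ⟨J1, J2, J3⟩ := spread_fold land H W (readCell land c₀.1 c₀.2) c₀ hinB₀
      (get_neighbors st1.1 c₀.2 c₀.1) hgnm (nodup_get_neighbors st1.1 c₀.2 c₀.1)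
      st1.1 st1.2 f0
    have hsteq : (trip land c₀ :: s').foldl (aStep land) st =
        s'.foldl (aStep land)
          ((get_neighbors st1.1 c₀.2 c₀.1).foldl
            (spreadStep land (readCell land c₀.1 c₀.2) c₀.1 c₀.2) (st1.1, st1.2)) := by
      rfl
    rw [hsteq]
    -- the new invariant for s'
    have hdown' : ∀ c ∈ allCells H W, trip land c ∉ s' →
        ∀ t' ∈ s', keyc land c < pyLex3 t' := by
      intro c hc hnot t' ht'
      by_cases hceq : trip land c = trip land c₀
      · have hcc : c = c₀ := trip_inj land c c₀ hceq
        subst hcc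
        exact hpwh t' ht'
      · apply hdown c hc _ t' (List.mem_cons_of_mem _ ht')
        intro hmm
        rcases List.mem_cons.mp hmm with he | hmm'
        · exact hceq he
        · exact hnot hmm'
    apply ih _ (List.pairwise_cons.mp hpw).2
      (fun t' ht' => hsub t' (List.mem_cons_of_mem _ ht')) hdown' 
    refine ⟨J1, by rw [J2, f3], ?_⟩
    rintro ⟨cy, cx⟩ hc
    have hcB : inB H W ((cy : Int), (cx : Int)) := (mem_allCells H W (cy, cx)).mp hc
    rw [J3 (cy, cx) hcB]
    by_cases hcc0 : ((cy : Int), (cx : Int)) = c₀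
    · rw [hcc0]
      have hnomem : (c₀.2, c₀.1) ∉ get_neighbors st1.1 c₀.2 c₀.1 := by
        intro hmm
        exact self_not_mem_cand c₀ (by simpa using ((hmemns c₀.2 c₀.1).mp hmm).1)
      rw [if_neg (fun h => hnomem h.1), f2]
      have hnot' : trip land (trigc land H W c₀) ∉ s' := by
        intro hmm
        cases hroot : pvParent land H W c₀.1 c₀.2 with
        | none =>
          simp only [trigc, hroot] at hmm
          exact lt_irrefl _ (hpwh _ hmm)
        | some p =>
          simp only [trigc, hroot] at hmm
          obtain ⟨hg, -, -⟩ := pvParent_some_spec land H W c₀.1 c₀.2 p hroot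
          exact lt_asymm (keyc_lt_of_goodN land H W (c₀.1, c₀.2) p hg) (hpwh _ hmm)
      rw [if_neg hnot']
    · -- c ≠ c₀
      have hr14 : readCell st1.1 cy cx = readCell st.1 cy cx := f4 (cy, cx) hc hcc0
      by_cases hcnd : ((cx : Int), (cy : Int)) ∈ get_neighbors st1.1 c₀.2 c₀.1 ∧
          readCell st1.1 cy cx = -1 ∧ readCell land c₀.1 c₀.2 < readCell land cy cx
      · -- the cell is written by the spread : its parent is c₀
        rw [if_pos hcnd, f2]
        obtain ⟨hin, hm1, hlvl⟩ := hcnd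
        obtain ⟨hcandc, -⟩ := (hmemns cx cy).mp hin
        have hold := hRead (cy, cx) hc
        rw [hr14] at hm1
        rw [hm1] at hold
        have hmemtr : trip land (trigc land H W (cy, cx)) ∈ trip land c₀ :: s' := by
          by_contra hno
          rw [if_neg hno] at hold
          exact hcast _ hold.symm
        have hgood : goodN land H W ((cy : Int), (cx : Int)) c₀ := ⟨hinB₀, hlvl⟩
        have hc₀cand : c₀ ∈ cand ((cy : Int), (cx : Int)) := (cand_symm c₀ (cy, cx)).mp hcandc
        cases hroot : pvParent land H W cy cx with
        | none =>
          exfalso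
          exact (pvParent_none_iff land H W cy cx).mp hroot c₀ hc₀cand hgood
        | some p =>
          obtain ⟨hgp, hpc, hmin⟩ := pvParent_some_spec land H W cy cx p hroot
          have hkle : keyc land p ≤ keyc land c₀ := hmin c₀ hc₀cand hgood
          have htr : trigc land H W (cy, cx) = p := by simp [trigc, hroot]
          rw [htr] at hmemtr
          have hpc₀ : p = c₀ := by
            rcases List.mem_cons.mp hmemtr with he | hmm
            · exact trip_inj land p c₀ he
            · exact absurd (hpwh _ hmm) (not_lt_of_ge hkle)
          have hnewroot : rootc land H W (cy, cx) = rootc land H W c₀ := by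
            rw [rootc_parent land H W (cy, cx) p hroot, hpc₀]
          rw [← hnewroot]
          have hnot' : trip land (trigc land H W (cy, cx)) ∉ s' := by
            rw [htr, hpc₀]
            intro hmm
            exact lt_irrefl _ (hpwh _ hmm)
          rw [if_neg hnot']
      · -- untouched cell
        rw [if_neg hcnd, hr14, hRead (cy, cx) hc]
        have hnethead : trip land (trigc land H W (cy, cx)) ≠ trip land c₀ := by
          intro he
          have htrig : trigc land H W (cy, cx) = c₀ :=
            trip_inj land (trigc land H W (cy, cx)) c₀ he
          cases hroot : pvParent land H W cy cx with
          | none =>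
            simp only [trigc, hroot] at htrig
            exact hcc0 htrig
          | some p =>
            simp only [trigc, hroot] at htrig
            obtain ⟨hgp, hpc, hmin⟩ := pvParent_some_spec land H W cy cx p hroot
            rw [htrig] at hpc hgp
            apply hcnd
            refine ⟨(hmemns cx cy).mpr ⟨(cand_symm (cy, cx) c₀).mp hpc, hcB⟩, ?_, hgp.2⟩
            rw [hr14]
            have hold := hRead (cy, cx) hc
            have hmemtr : trip land (trigc land H W (cy, cx)) ∈ trip land c₀ :: s' := by
              simp only [trigc, hroot]
              rw [htrig]
              exact List.mem_cons_self
            rw [if_pos hmemtr] at hold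
            exact hold
        by_cases hmm : trip land (trigc land H W (cy, cx)) ∈ s'
        · rw [if_pos hmm, if_pos (List.mem_cons_of_mem _ hmm)]
        · rw [if_neg hmm, if_neg (fun h => by
            rcases List.mem_cons.mp h with he | h'
            · exact hnethead he
            · exact hmm h')]
-- A's main loop, started from the sorted queue
def pvFIN (land : List (List Int)) (H W : Nat) : List (List Int) × Int :=
  (PySem.List.sorted ((allCells H W).map (trip land)) pyLex3 false).foldl
    (aStep land) (List.replicate H (List.replicate W (-1)), 0)

-- the flooded grid : after A's main loop every cell holds the index of its root
theorem inter_spec (land : List (List Int)) (H W : Nat)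
    (hlen : land.length = H) (hW : ∀ row ∈ land, row.length = W) (hH0 : 0 < H) :
    Shape (pvFIN land H W).1 H W ∧
    (pvFIN land H W).2 = ((rootsL land H W).length : Int) ∧
    ∀ c ∈ allCells H W,
      readCell (pvFIN land H W).1 c.1 c.2 =
        ((idxr land H W (rootc land H W c)) : Int) := by
  unfold pvFIN
  have hq := PySem.List.sorted_perm ((allCells H W).map (trip land)) pyLex3 false
  have hmemS : ∀ c ∈ allCells H W,
      trip land c ∈ PySem.List.sorted ((allCells H W).map (trip land)) pyLex3 false := by
    intro c hc
    exact (hq.mem_iff).mpr (List.mem_map_of_mem hc)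
  have hfin := aInv_fold land H W hlen hW hH0
    (PySem.List.sorted ((allCells H W).map (trip land)) pyLex3 false)
    (List.replicate H (List.replicate W (-1)), 0)
    (sorted_queue_pairwise land H W hq)
    (by
      intro t ht
      have := hq.mem_iff.mp ht
      obtain ⟨c, hc, rfl⟩ := List.mem_map.mp this
      exact ⟨c, hc, rfl⟩)
    (by
      intro c hc hnot
      exact absurd (hmemS c hc) hnot)
    (by
      refine ⟨shape_replicate H W (-1), ?_, ?_⟩
      · simp only []
        rw [List.countP_eq_zero.mpr]
        · simp
        · intro r hr
          simp only [decide_eq_true_eq, not_not]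
          exact hmemS r (rootsL_sub land H W r hr)
      · intro c hc
        rw [if_pos (hmemS _ (trigc_mem land H W c hc))]
        exact readCell_replicate H W (-1) c.1 c.2 ((mem_allCells H W c).mp hc))
  obtain ⟨g1, g2, g3⟩ := hfin
  refine ⟨g1, ?_, ?_⟩
  · rw [g2]
    congr 1
    simp
  · intro c hc
    rw [g3 c hc]
    simp

def letterOf (i : Int) : String :=
  ((PySem.Str.pyGet? "abcdefghijklmnopqrstuvwxyz" i).map Char.toString).getD "#"

-- A's letter pass, one cell
def aLet (inter : List (List Int)) (y : Int) :
    (List (List String) × List Int × Int) → Int → (List (List String) × List Int × Int) :=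
  fun st x =>
    let key := readCell inter y x
    let st' : List (List String) × List Int × Int :=
      if PySem.List.pyGetD st.2.1 key 0 = -1 then
        (st.1, st.2.1.set key.toNat st.2.2, st.2.2 + 1)
      else st
    (setCell st'.1 y x
       (((PySem.Str.pyGet? "abcdefghijklmnopqrstuvwxyz"
          (PySem.List.pyGetD st'.2.1 key 0)).map Char.toString).getD "#"),
     st'.2.1, st'.2.2)

-- B's letter pass, one cell
def bLet (land : List (List Int)) (H W : Nat) (y : Int) :
    (List String × PySem.Dict (Int × Int) String) → Int →
      (List String × PySem.Dict (Int × Int) String) :=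
  fun rs x =>
    let r := pvFind land H W (H * W) y x
    let d := if rs.2.contains r then rs.2
             else rs.2.insert r
               (((PySem.Str.pyGet? "abcdefghijklmnopqrstuvwxyz"
                  (rs.2.size : Int)).map Char.toString).getD "#")
    (rs.1 ++ [d.getD r "#"], d)

-- simulation relation between A's (alphabet_map, letter) and B's letters dict
def LRel (land : List (List Int)) (H W : Nat) (amap : List Int) (letter : Int)
    (dict : PySem.Dict (Int × Int) String) : Prop :=
  amap.length = (rootsL land H W).length ∧
  letter = (dict.size : Int) ∧
  (∀ r ∈ rootsL land H W,
    (dict.contains r = true ↔ amap.getD (idxr land H W r) 0 ≠ -1)) ∧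
  (∀ r ∈ rootsL land H W, dict.contains r = true →
    dict.getD r "#" = letterOf (amap.getD (idxr land H W r) 0))
theorem row_sim (land : List (List Int)) (H W : Nat) (inter : List (List Int))
    (hint : ∀ c ∈ allCells H W,
      readCell inter c.1 c.2 = ((idxr land H W (rootc land H W c)) : Int))
    (y : Int) (hy : 0 ≤ y ∧ y < (H : Int)) :
    ∀ (xs : List Int), (∀ x ∈ xs, 0 ≤ x ∧ x < (W : Int)) → xs.Nodup →
    ∀ (regions : List (List String)) (amap : List Int) (letter : Int)
      (row : List String) (dict : PySem.Dict (Int × Int) String),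
      Shape regions H W → LRel land H W amap letter dict →
      Shape ((xs.foldl (aLet inter y) (regions, amap, letter)).1) H W ∧
      LRel land H W ((xs.foldl (aLet inter y) (regions, amap, letter)).2.1)
        ((xs.foldl (aLet inter y) (regions, amap, letter)).2.2)
        ((xs.foldl (bLet land H W y) (row, dict)).2) ∧
      (xs.foldl (bLet land H W y) (row, dict)).1 =
        row ++ xs.map (fun x =>
          readCell ((xs.foldl (aLet inter y) (regions, amap, letter)).1) y x) ∧
      (∀ cy cx : Int, inB H W (cy, cx) → (cy ≠ y ∨ cx ∉ xs) →
        readCell ((xs.foldl (aLet inter y) (regions, amap, letter)).1) cy cx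
          = readCell regions cy cx) := by
  intro xs
  induction xs with
  | nil =>
    intro _ _ regions amap letter row dict hsh hrel
    exact ⟨hsh, hrel, by simp, fun cy cx _ _ => rfl⟩
  | cons x xs ih =>
    intro hxs hnd regions amap letter row dict hsh hrel
    obtain ⟨hx0, hxW⟩ := hxs x List.mem_cons_self
    simp only [List.nodup_cons] at hnd
    have hcB : inB H W (y, x) := ⟨hy.1, hy.2, hx0, hxW⟩
    have hcA : (y, x) ∈ allCells H W := inB_mem_allCells H W (y, x) hcB
    have hR : pvFind land H W (H * W) y x = rootc land H W (y, x) :=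
      pvFind_eq_rootc land H W (H * W) (y, x) (rankc_lt_HW land H W (y, x) hcA)
    have hRroot : rootc land H W (y, x) ∈ rootsL land H W := rootc_mem_rootsL land H W (y, x) hcA
    have hkey : readCell inter y x = ((idxr land H W (rootc land H W (y, x))) : Int) :=
      hint (y, x) hcA
    have htn : (readCell inter y x).toNat = idxr land H W (rootc land H W (y, x)) := by
      rw [hkey]; simp
    have hread : PySem.List.pyGetD amap (readCell inter y x) 0 =
        amap.getD (idxr land H W (rootc land H W (y, x))) 0 := by
      rw [PySem.List.pyGetD_of_nonneg _ _ (by rw [hkey]; exact Int.natCast_nonneg _), htn]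
    have hidx_lt : idxr land H W (rootc land H W (y, x)) < amap.length := by
      rw [hrel.1]
      exact idxr_lt_length land H W _ hRroot
    obtain ⟨hlen, hsz, hcont, hget⟩ := hrel
    have hset_self : (amap.set (readCell inter y x).toNat letter).getD
        (idxr land H W (rootc land H W (y, x))) 0 = letter := by
      rw [htn]
      exact pv_getD_set_self amap _ letter 0 hidx_lt
    have hset_ne : ∀ i : Nat, i ≠ idxr land H W (rootc land H W (y, x)) →
        (amap.set (readCell inter y x).toNat letter).getD i 0 = amap.getD i 0 := by
      intro i hi
      rw [htn]
      exact pv_getD_set_ne amap _ i letter 0 hi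
    -- one cell : A's and B's updated states and the written letter
    have cell : Shape (aLet inter y (regions, amap, letter) x).1 H W ∧
        LRel land H W (aLet inter y (regions, amap, letter) x).2.1
          (aLet inter y (regions, amap, letter) x).2.2
          (bLet land H W y (row, dict) x).2 ∧
        (bLet land H W y (row, dict) x).1 =
          row ++ [readCell (aLet inter y (regions, amap, letter) x).1 y x] ∧
        (∀ cy cx : Int, inB H W (cy, cx) → ¬ (cy = y ∧ cx = x) →
          readCell (aLet inter y (regions, amap, letter) x).1 cy cx
            = readCell regions cy cx) := by
      by_cases hnew : amap.getD (idxr land H W (rootc land H W (y, x))) 0 = -1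
      · -- a fresh region : both sides assign the next letter
        have hcfalse : dict.contains (rootc land H W (y, x)) = false := by
          cases hcd : dict.contains (rootc land H W (y, x)) with
          | false => rfl
          | true => exact absurd hnew (by simpa using (hcont _ hRroot).mp hcd)
        have haLet : aLet inter y (regions, amap, letter) x =
            (setCell regions y x (letterOf letter),
             amap.set (readCell inter y x).toNat letter, letter + 1) := by
          simp only [aLet, hread, if_pos hnew]
          have h2 : PySem.List.pyGetD (amap.set (readCell inter y x).toNat letter)
              (readCell inter y x) 0 = letter := by
            rw [PySem.List.pyGetD_of_nonneg _ _ (by rw [hkey]; exact Int.natCast_nonneg _), htn]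
            exact pv_getD_set_self amap _ letter 0 hidx_lt
          rw [h2]
          rfl
        have hbLet : bLet land H W y (row, dict) x =
            (row ++ [letterOf letter],
             dict.insert (rootc land H W (y, x)) (letterOf letter)) := by
          simp only [bLet, hR, hcfalse, Bool.false_eq_true, if_false]
          have hszl : ((dict.size : Int)) = letter := hsz.symm
          rw [hszl]
          rw [PySem.Dict.getD_insert_self]
          rfl
        rw [haLet, hbLet]
        have hsh' : Shape (setCell regions y x (letterOf letter)) H W :=
          shape_setCell regions H W hsh y x hcB _
        refine ⟨hsh', ?_, ?_, ?_⟩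
        · refine ⟨by rw [List.length_set]; exact hlen, ?_, ?_, ?_⟩
          · rw [PySem.Dict.size_insert, hcfalse]
            simp only [Bool.false_eq_true, if_false]
            rw [hsz]
            push_cast
            ring
          · intro r' hr'
            by_cases hrr : r' = rootc land H W (y, x)
            · subst hrr
              rw [PySem.Dict.contains_insert_self, hset_self]
              simp only [true_iff]
              rw [hsz]
              omega
            · have hii : idxr land H W r' ≠ idxr land H W (rootc land H W (y, x)) :=
                fun he => hrr (idxr_inj land H W r' _ hr' hRroot he)
              rw [PySem.Dict.contains_insert]
              have : (r' == rootc land H W (y, x)) = false := by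
                simp only [beq_eq_false_iff_ne, ne_eq]
                exact hrr
              rw [this, Bool.false_or, hset_ne _ hii]
              exact hcont r' hr'
          · intro r' hr' hcd
            by_cases hrr : r' = rootc land H W (y, x)
            · subst hrr
              rw [PySem.Dict.getD_insert_self, hset_self]
            · have hii : idxr land H W r' ≠ idxr land H W (rootc land H W (y, x)) :=
                fun he => hrr (idxr_inj land H W r' _ hr' hRroot he)
              rw [PySem.Dict.getD_insert_of_ne _ _ _ hrr, hset_ne _ hii]
              apply hget r' hr'
              rw [PySem.Dict.contains_insert] at hcd
              have : (r' == rootc land H W (y, x)) = false := by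
                simp only [beq_eq_false_iff_ne, ne_eq]
                exact hrr
              rw [this, Bool.false_or] at hcd
              exact hcd
        · rw [readCell_setCell_self regions H W hsh y x hcB]
        · intro cy cx hcc hne
          apply readCell_setCell_ne regions H W hsh _ _ _ _ hcB hcc
          intro he
          simp only [Prod.mk.injEq] at he
          exact hne he
      · -- an already-lettered region : both sides reuse the stored letter
        have hctrue : dict.contains (rootc land H W (y, x)) = true := by
          cases hcd : dict.contains (rootc land H W (y, x)) with
          | true => rfl
          | false =>
            exfalso
            apply hnew
            by_contra hne'
            exact absurd ((hcont _ hRroot).mpr hne') (by simp [hcd])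
        have haLet : aLet inter y (regions, amap, letter) x =
            (setCell regions y x
              (letterOf (amap.getD (idxr land H W (rootc land H W (y, x))) 0)),
             amap, letter) := by
          simp only [aLet, hread, if_neg hnew]
          rfl
        have hbLet : bLet land H W y (row, dict) x =
            (row ++ [dict.getD (rootc land H W (y, x)) "#"], dict) := by
          simp only [bLet, hR, hctrue, if_true]
        rw [haLet, hbLet]
        have hsh' : Shape (setCell regions y x
            (letterOf (amap.getD (idxr land H W (rootc land H W (y, x))) 0))) H W :=
          shape_setCell regions H W hsh y x hcB _
        refine ⟨hsh', ⟨hlen, hsz, hcont, hget⟩, ?_, ?_⟩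
        · rw [readCell_setCell_self regions H W hsh y x hcB]
          rw [hget _ hRroot hctrue]
        · intro cy cx hcc hne
          apply readCell_setCell_ne regions H W hsh _ _ _ _ hcB hcc
          intro he
          simp only [Prod.mk.injEq] at he
          exact hne he
    obtain ⟨c1, c2, c3, c4⟩ := cell
    simp only [List.foldl_cons]
    obtain ⟨I1, I2, I3, I4⟩ := ih (fun x' hx' => hxs x' (List.mem_cons_of_mem _ hx')) hnd.2
      (aLet inter y (regions, amap, letter) x).1
      (aLet inter y (regions, amap, letter) x).2.1
      (aLet inter y (regions, amap, letter) x).2.2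
      (bLet land H W y (row, dict) x).1
      (bLet land H W y (row, dict) x).2 c1 c2
    refine ⟨I1, I2, ?_, ?_⟩
    · rw [I3, c3]
      simp only [List.map_cons, List.append_assoc, List.singleton_append]
      congr 2
      exact (I4 y x hcB (Or.inr hnd.1)).symm
    · intro cy cx hcc hne
      rw [I4 cy cx hcc (by
        rcases hne with h | h
        · exact Or.inl h
        · exact Or.inr (fun hm => h (List.mem_cons_of_mem _ hm)))]
      apply c4 cy cx hcc
      intro ⟨he1, he2⟩
      rcases hne with h | h
      · exact h he1
      · exact h (he2 ▸ List.mem_cons_self)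
def aRow (inter : List (List Int)) (Wz : Int) :
    (List (List String) × List Int × Int) → Int → (List (List String) × List Int × Int) :=
  fun st y => (PySem.List.pyRange 0 Wz 1).foldl (aLet inter y) st

def bRow (land : List (List Int)) (H W : Nat) (Wz : Int) :
    (List (List String) × PySem.Dict (Int × Int) String) → Int →
      (List (List String) × PySem.Dict (Int × Int) String) :=
  fun rs y =>
    let inner := (PySem.List.pyRange 0 Wz 1).foldl (bLet land H W y) ([], rs.2)
    (rs.1 ++ [inner.1], inner.2)

theorem grid_sim (land : List (List Int)) (H W : Nat) (inter : List (List Int))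
    (hint : ∀ c ∈ allCells H W,
      readCell inter c.1 c.2 = ((idxr land H W (rootc land H W c)) : Int)) :
    ∀ (ys : List Int), (∀ y' ∈ ys, 0 ≤ y' ∧ y' < (H : Int)) → ys.Nodup →
    ∀ (regions : List (List String)) (amap : List Int) (letter : Int)
      (rows : List (List String)) (dict : PySem.Dict (Int × Int) String),
      Shape regions H W → LRel land H W amap letter dict →
      Shape ((ys.foldl (aRow inter (W : Int)) (regions, amap, letter)).1) H W ∧
      (ys.foldl (bRow land H W (W : Int)) (rows, dict)).1 =
        rows ++ ys.map (fun y' => (PySem.List.pyRange 0 (W : Int) 1).map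
          (fun x => readCell ((ys.foldl (aRow inter (W : Int)) (regions, amap, letter)).1) y' x)) ∧
      (∀ cy cx : Int, inB H W (cy, cx) → cy ∉ ys →
        readCell ((ys.foldl (aRow inter (W : Int)) (regions, amap, letter)).1) cy cx
          = readCell regions cy cx) := by
  intro ys
  induction ys with
  | nil =>
    intro _ _ regions amap letter rows dict hsh hrel
    exact ⟨hsh, by simp, fun cy cx _ _ => rfl⟩
  | cons y ys ihy =>
    intro hys hnd regions amap letter rows dict hsh hrel
    obtain ⟨hy0, hyH⟩ := hys y List.mem_cons_self
    simp only [List.nodup_cons] at hnd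
    have hxb : ∀ x ∈ PySem.List.pyRange 0 (W : Int) 1, 0 ≤ x ∧ x < (W : Int) := by
      intro x hx
      exact PySem.List.mem_pyRange_one.mp hx
    obtain ⟨R1, R2, R3, R4⟩ := row_sim land H W inter hint y ⟨hy0, hyH⟩
      (PySem.List.pyRange 0 (W : Int) 1) hxb (PySem.List.nodup_pyRange_one _ _)
      regions amap letter [] dict hsh hrel
    simp only [List.foldl_cons]
    have hbstep : bRow land H W (W : Int) (rows, dict) y =
        (rows ++ [((PySem.List.pyRange 0 (W : Int) 1).foldl (bLet land H W y) ([], dict)).1],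
         ((PySem.List.pyRange 0 (W : Int) 1).foldl (bLet land H W y) ([], dict)).2) := by
      rfl
    rw [hbstep]
    obtain ⟨I1, I2, I3⟩ := ihy (fun y' hy' => hys y' (List.mem_cons_of_mem _ hy')) hnd.2
      ((PySem.List.pyRange 0 (W : Int) 1).foldl (aLet inter y) (regions, amap, letter)).1
      ((PySem.List.pyRange 0 (W : Int) 1).foldl (aLet inter y) (regions, amap, letter)).2.1
      ((PySem.List.pyRange 0 (W : Int) 1).foldl (aLet inter y) (regions, amap, letter)).2.2
      (rows ++ [((PySem.List.pyRange 0 (W : Int) 1).foldl (bLet land H W y) ([], dict)).1])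
      ((PySem.List.pyRange 0 (W : Int) 1).foldl (bLet land H W y) ([], dict)).2 R1 R2
    have hfold_eq : ys.foldl (aRow inter (W : Int))
        ((PySem.List.pyRange 0 (W : Int) 1).foldl (aLet inter y) (regions, amap, letter)) =
        ys.foldl (aRow inter (W : Int)) (aRow inter (W : Int) (regions, amap, letter) y) := rfl
    refine ⟨?_, ?_, ?_⟩
    · exact I1
    · rw [I2, R3]
      simp only [List.map_cons, List.append_assoc, List.singleton_append, List.nil_append]
      congr 2
      apply List.map_congr_left
      intro x hx
      obtain ⟨hx0, hxW⟩ := PySem.List.mem_pyRange_one.mp hx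
      exact (I3 y x ⟨hy0, hyH, hx0, hxW⟩ hnd.1).symm
    · intro cy cx hcc hny
      have hny1 : cy ≠ y := fun he => hny (he ▸ List.mem_cons_self)
      have hny2 : cy ∉ ys := fun hm => hny (List.mem_cons_of_mem _ hm)
      exact (I3 cy cx hcc hny2).trans (R4 cy cx hcc (Or.inl hny1))

theorem head_len (land : List (List Int)) :
    PySem.List.pyGetD land 0 [] = land.headD [] := by
  cases land with
  | nil => rfl
  | cons r t =>
    rw [PySem.List.pyGetD_of_nonneg _ _ (le_refl 0)]
    rfl

theorem getD_replicate_neg1 (n i : Nat) (h : i < n) :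
    (List.replicate n (-1 : Int)).getD i 0 = -1 := by
  rw [List.getD_eq_getElem _ _ (by simpa using h), List.getElem_replicate]

theorem lrel_init (land : List (List Int)) (H W : Nat) :
    LRel land H W (List.replicate (rootsL land H W).length (-1)) 0 PySem.Dict.empty := by
  refine ⟨by simp, by simp [PySem.Dict.size_empty], ?_, ?_⟩
  · intro r hr
    rw [PySem.Dict.contains_empty]
    simp only [Bool.false_eq_true, false_iff, not_not]
    exact getD_replicate_neg1 _ _ (idxr_lt_length land H W r hr)
  · intro r hr hcd
    rw [PySem.Dict.contains_empty] at hcd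
    cases hcd

theorem grid_eq_map (m : List (List String)) (H W : Nat) (hs : Shape m H W) :
    (PySem.List.pyRange 0 (H : Int) 1).map (fun y => (PySem.List.pyRange 0 (W : Int) 1).map
      (fun x => readCell m y x)) = m := by
  apply List.ext_getElem
  · simp [PySem.List.length_pyRange_one, hs.1]
  · intro i h1 h2
    rw [List.getElem_map, PySem.List.getElem_pyRange_one]
    have hiH : i < H := by
      simpa [PySem.List.length_pyRange_one] using h1
    apply List.ext_getElem
    · simp only [List.length_map, PySem.List.length_pyRange_one]
      have := hs.2 m[i] (List.getElem_mem h2)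
      omega
    · intro j g1 g2
      rw [List.getElem_map, PySem.List.getElem_pyRange_one]
      have hjW : j < W := by
        have := hs.2 m[i] (List.getElem_mem h2)
        omega
      rw [readCell_eq_getElem m H W hs _ _ (by
        constructor
        · omega
        · constructor
          · omega
          · constructor <;> omega)]
      have ht1 : ((0 : Int) + (i : Int)).toNat = i := by omega
      have ht2 : ((0 : Int) + (j : Int)).toNat = j := by omega
      rw [ht1, ht2]
      have hrow : m.getD i [] = m[i] := List.getD_eq_getElem _ _ h2
      rw [hrow, List.getD_eq_getElem _ _ g2]
theorem watershed_eq (land : List (List Int)) (hpre : Pre_watershed land) :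
    watershed land = watershed_alt land := by
  obtain ⟨hne, hrect, -⟩ := hpre
  set W := (PySem.List.pyGetD land 0 []).length with hWdef
  have hW : ∀ row ∈ land, row.length = W := by
    intro row h
    rw [hrect row h, hWdef, head_len land]
  have hH0 : 0 < land.length := by
    cases land
    · exact absurd rfl hne
    · simp
  obtain ⟨S1, S2, S3⟩ := inter_spec land land.length W rfl hW hH0
  have hA : watershed land =
      ((PySem.List.pyRange 0 (land.length : Int) 1).foldl
        (aRow (pvFIN land land.length W).1 (W : Int))
        (List.replicate land.length (List.replicate W "#"),
         List.replicate (pvFIN land land.length W).2.toNat (-1), 0)).1 := by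
    unfold watershed pvFIN aRow aLet aStep
    rw [queue_eq land W hW]
  have hB : watershed_alt land =
      ((PySem.List.pyRange 0 (land.length : Int) 1).foldl
        (bRow land land.length W (W : Int)) ([], PySem.Dict.empty)).1 := by
    unfold watershed_alt bRow bLet
    rfl
  rw [hA, hB, S2]
  have htn : ((((rootsL land land.length W).length : Int)).toNat)
      = (rootsL land land.length W).length := by simp
  rw [htn]
  obtain ⟨G1, G2, G3⟩ := grid_sim land land.length W (pvFIN land land.length W).1 S3
    (PySem.List.pyRange 0 (land.length : Int) 1)
    (fun y' hy' => PySem.List.mem_pyRange_one.mp hy')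
    (PySem.List.nodup_pyRange_one _ _)
    (List.replicate land.length (List.replicate W "#"))
    (List.replicate (rootsL land land.length W).length (-1)) 0 [] PySem.Dict.empty
    (shape_replicate land.length W "#") (lrel_init land land.length W)
  rw [G2]
  simp only [List.nil_append]
  exact (grid_eq_map _ land.length W G1).symm

-- ===== VERDICT (by name: the statement is the Claim_ definition above) =====
theorem watershed_spec : Claim_equal_watershed := by
  intro land _ hpre
  exact watershed_eq land hpre
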